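-- pv_equiv track=rewrite | github.com/pypi-data/pypi-mirror-30 | packages/reflowrst/reflowrst-1.1.0.tar.gz/reflowrst-1.1.0/reflowrst/tools/data2rst.py | getSpanColumnCount
-- ===== SOURCE A (Python) =====
-- def getSpanColumnCount(span):
--     """Gets the number of columns inluded in a span"""
--     columns = 1
--     first_column = span[0][1]
--     for i in range(len(span)):
--         if span[i][1] > first_column:
--             columns += 1
--             first_column = span[i][1]
--     return columns
-- ===== SOURCE B (Python) =====
-- def getSpanColumnCount(span):
--     """Gets the number of columns inluded in a span"""
--     count = 0
--     seen = []
--     for _, col in span: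
--         if all(c < col for c in seen):
--             count += 1
--         seen.append(col)
--     return count
-- ===== Notes on version B (the rewrite author's own statement) =====
-- stated objective: alternative
-- what changed: B keeps no running maximum: it counts the left-to-right maxima by comparing each column against the full list of previously seen columns (a pairwise all-scan), instead of A's threshold-and-counter single state; Pre_ excludes only the empty list, on which A raises IndexError.
-- outside the precondition, e.g. on getSpanColumnCount([]): A raises IndexError, B returns 0
import Mathlib
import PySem

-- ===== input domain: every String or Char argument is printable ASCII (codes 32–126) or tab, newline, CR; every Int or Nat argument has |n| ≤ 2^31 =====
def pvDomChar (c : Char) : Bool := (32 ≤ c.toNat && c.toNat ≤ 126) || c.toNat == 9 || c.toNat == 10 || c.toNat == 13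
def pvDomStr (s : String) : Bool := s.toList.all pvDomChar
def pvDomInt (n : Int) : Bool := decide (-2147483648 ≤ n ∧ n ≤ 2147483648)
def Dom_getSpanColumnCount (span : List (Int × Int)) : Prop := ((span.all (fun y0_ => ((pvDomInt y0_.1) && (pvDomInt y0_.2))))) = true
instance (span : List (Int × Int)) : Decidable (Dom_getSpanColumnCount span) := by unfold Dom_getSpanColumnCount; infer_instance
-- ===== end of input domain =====

-- B counts left-to-right maxima by comparing each column against all previously seen columns (pairwise scan, no running maximum); alternative decomposition, not faster.

-- ===== PORT A =====
def getSpanColumnCount (span : List (Int × Int)) : Int :=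
  -- columns = 1; first_column = span[0][1]  (IndexError on empty span: excluded by Pre_)
  match PySem.List.pyGet? span 0 with
  | none => 0
  | some first =>
    -- for i in range(len(span)): …   (every i is in range, so pyGetD is exact here)
    let st := (PySem.List.pyRange 0 (span.length : Int) 1).foldl
      (fun (s : Int × Int) i =>
        let c := PySem.List.pyGetD span i (0, 0)
        if c.2 > s.2 then (s.1 + 1, c.2) else s)
      (1, first.2)
    st.1

-- ===== PORT B =====
def getSpanColumnCount_alt (span : List (Int × Int)) : Int :=
  -- count = 0; seen = []; for _, col in span: if all(c < col for c in seen): count += 1; seen.append(col)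
  let st := span.foldl
    (fun (st : Int × List Int) p =>
      (if st.2.all (fun c => decide (c < p.2)) then st.1 + 1 else st.1, st.2 ++ [p.2]))
    (0, [])
  st.1

-- ===== PRECONDITION & SPEC =====
-- Pre_ excludes only the empty list, on which A raises IndexError (span[0][1]).
def Pre_getSpanColumnCount (span : List (Int × Int)) : Prop := span ≠ []
instance (span : List (Int × Int)) : Decidable (Pre_getSpanColumnCount span) := by unfold Pre_getSpanColumnCount; infer_instance
def pvWitness_getSpanColumnCount : (List (Int × Int)) := [(0, 1), (0, 3)]

def Spec_getSpanColumnCount (span : List (Int × Int)) (out : Int) : Prop := out = getSpanColumnCount_alt span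
instance (span : List (Int × Int)) (out : Int) : Decidable (Spec_getSpanColumnCount span out) := by unfold Spec_getSpanColumnCount; infer_instance

-- ===== CLAIM (what is proved, stated in full; the proofs are below) =====
def Claim_equal_getSpanColumnCount : Prop := ∀ (span : List (Int × Int)), Dom_getSpanColumnCount span → Pre_getSpanColumnCount span → Spec_getSpanColumnCount span (getSpanColumnCount span)

-- ===== LEMMAS AND PROOFS =====

-- number of strict increases of the running maximum, seeded with m
def pvInc : Int → List (Int × Int) → Int
  | _, [] => 0
  | m, v :: vs => if v.2 > m then pvInc v.2 vs + 1 else pvInc m vs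

theorem pvA_fold (vs : List (Int × Int)) : ∀ (k m : Int),
    (vs.foldl (fun (s : Int × Int) c => if c.2 > s.2 then (s.1 + 1, c.2) else s) (k, m)).1
      = k + pvInc m vs := by
  induction vs with
  | nil => intro k m; simp [pvInc]
  | cons v vs ih =>
    intro k m
    simp only [List.foldl_cons, pvInc]
    by_cases h : v.2 > m
    · simp [h, ih]; omega
    · simp [h, ih]

theorem pvB_fold (vs : List (Int × Int)) : ∀ (k : Int) (seen : List Int) (m : Int),
    m ∈ seen → (∀ c ∈ seen, c ≤ m) →
    (vs.foldl
        (fun (st : Int × List Int) p =>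
          (if st.2.all (fun c => decide (c < p.2)) then st.1 + 1 else st.1, st.2 ++ [p.2]))
        (k, seen)).1
      = k + pvInc m vs := by
  induction vs with
  | nil => intro k seen m _ _; simp [pvInc]
  | cons v vs ih =>
    intro k seen m hmem hle
    simp only [List.foldl_cons, pvInc]
    by_cases h : v.2 > m
    · have hall : seen.all (fun c => decide (c < v.2)) = true := by
        simp only [List.all_eq_true, decide_eq_true_eq]
        intro c hc; exact lt_of_le_of_lt (hle c hc) h
      rw [hall]
      simp only [if_pos, h]
      rw [ih (k + 1) (seen ++ [v.2]) v.2
        (by simp)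
        (by intro c hc
            rcases List.mem_append.1 hc with hc | hc
            · exact le_of_lt (lt_of_le_of_lt (hle c hc) h)
            · simp at hc; omega)]
      omega
    · have hall : seen.all (fun c => decide (c < v.2)) = false := by
        simp only [List.all_eq_false]
        exact ⟨m, hmem, by simp; omega⟩
      rw [hall]
      simp only [if_false, h]
      exact ih k (seen ++ [v.2]) m
        (List.mem_append.2 (Or.inl hmem))
        (by intro c hc
            rcases List.mem_append.1 hc with hc | hc
            · exact hle c hc
            · simp at hc; omega)

-- ===== VERDICT (by name: the statement is the Claim_ definition above) =====
theorem getSpanColumnCount_spec : Claim_equal_getSpanColumnCount := by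
  intro span _ hpre
  unfold Spec_getSpanColumnCount getSpanColumnCount getSpanColumnCount_alt
  match span with
  | [] => exact absurd rfl hpre
  | x :: xs =>
    simp only [PySem.List.pyGet?, PySem.List.pyIdx?]
    norm_num
    have hlen : (xs.length : Int) + 1 = (((x :: xs).length : Nat) : Int) := by simp
    rw [hlen, PySem.List.foldl_pyRange_zero_pyGetD' (x :: xs) ((0, 0) : Int × Int)
          (fun (s : Int × Int) c => if s.2 < c.2 then (s.1 + 1, c.2) else s) (1, x.2)]
    simp only [List.foldl_cons]
    have hA := pvA_fold xs 1 x.2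
    have hB := pvB_fold xs 1 [x.2] x.2 (by simp) (by intro c hc; simp at hc; omega)
    simp only [show ¬ (x.2 > x.2) by omega, if_false, gt_iff_lt] at hA hB ⊢
    simp only [List.all_eq_true, decide_eq_true_eq] at hB
    rw [hA, hB]
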